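-- pv_equiv track=rewrite | github.com/sankaL/resume-app | agents/experience_contract.py | _section_blocks
-- ===== SOURCE A (Python) =====
-- def _section_blocks(section_markdown: str, heading: str) -> list[list[str]]:
--     if not section_markdown.strip():
--         return []
--
--     lines = section_markdown.strip().splitlines()
--     if lines and lines[0].strip().lower().startswith(heading.lower()):
--         lines = lines[1:]
--
--     blocks: list[list[str]] = []
--     current: list[str] = []
--     for line in lines:
--         if not line.strip():
--             if current:
--                 blocks.append(current)
--                 current = []
--             continue
--         current.append(line.rstrip())
--     if current:
--         blocks.append(current)
--     return blocks
-- ===== SOURCE B (Python) =====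
-- def _section_blocks(section_markdown: str, heading: str) -> list[list[str]]:
--     text = section_markdown.strip()
--     if not text:
--         return []
--
--     lines = text.splitlines()
--     if lines and lines[0].strip().lower().startswith(heading.lower()):
--         lines = lines[1:]
--
--     blocks: list[list[str]] = []
--     i, n = 0, len(lines)
--     while i < n:
--         if not lines[i].strip():
--             i += 1
--             continue
--         j = i
--         while j < n and lines[j].strip():
--             j += 1
--         blocks.append([line.rstrip() for line in lines[i:j]])
--         i = j
--     return blocks
-- ===== Notes on version B (the rewrite author's own statement) =====
-- stated objective: alternative
-- what changed: Replaces A's per-line accumulator/flush state machine with a two-pointer run scanner that locates each maximal run of non-blank lines and emits it as a block in one step.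
import Mathlib
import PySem

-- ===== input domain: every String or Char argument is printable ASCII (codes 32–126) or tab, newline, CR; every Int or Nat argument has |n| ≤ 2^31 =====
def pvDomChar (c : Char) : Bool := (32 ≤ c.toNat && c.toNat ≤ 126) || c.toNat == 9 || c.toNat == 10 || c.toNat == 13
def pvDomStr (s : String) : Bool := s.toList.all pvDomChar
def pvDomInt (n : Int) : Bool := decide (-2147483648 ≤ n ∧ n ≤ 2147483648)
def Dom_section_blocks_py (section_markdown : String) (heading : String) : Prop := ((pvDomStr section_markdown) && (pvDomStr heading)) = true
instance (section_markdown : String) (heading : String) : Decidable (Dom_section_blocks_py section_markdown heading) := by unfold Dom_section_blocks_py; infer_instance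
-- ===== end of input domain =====

-- B replaces A's per-line accumulator/flush state machine by a two-pointer scanner that
-- emits each maximal run of non-blank lines as one block (alternative decomposition, same cost).

-- ===== PORT A =====
-- A's for-loop over `lines` with state (blocks, current); the trailing `if current:` flush is the [] case.
def pvALoop : List String → List (List String) → List String → List (List String)
  | [], blocks, current => if current = [] then blocks else blocks ++ [current]
  | l :: rest, blocks, current =>
      if PySem.Str.strip l = "" then
        if current = [] then pvALoop rest blocks []
        else pvALoop rest (blocks ++ [current]) []
      else pvALoop rest blocks (current ++ [PySem.Str.rstrip l])

def section_blocks_py (section_markdown : String) (heading : String) : List (List String) :=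
  if PySem.Str.strip section_markdown = "" then []
  else
    let lines := PySem.Str.splitlines (PySem.Str.strip section_markdown)
    let lines :=
      match lines with
      | [] => lines
      | l0 :: rest =>
          if PySem.Str.startswith (PySem.Str.lower (PySem.Str.strip l0)) (PySem.Str.lower heading)
          then rest else lines
    pvALoop lines [] []

-- ===== PORT B =====
-- B's outer while: skip a blank line, else take the maximal non-blank run (inner while = takeWhile)
-- as one block and continue after it (dropWhile).
def pvNonBlank (l : String) : Bool := !(PySem.Str.strip l == "")

def pvBLoop : List String → List (List String)
  | [] => []
  | l :: rest =>
      if pvNonBlank l then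
        ((l :: rest).takeWhile pvNonBlank).map PySem.Str.rstrip ::
          pvBLoop ((l :: rest).dropWhile pvNonBlank)
      else
        pvBLoop rest
termination_by ls => ls.length
decreasing_by
  · simp_all [List.dropWhile]
    exact List.length_dropWhile_le _ _
  · simp

def section_blocks_py_alt (section_markdown : String) (heading : String) : List (List String) :=
  let text := PySem.Str.strip section_markdown
  if text = "" then []
  else
    let lines := PySem.Str.splitlines text
    let lines :=
      match lines with
      | [] => lines
      | l0 :: rest =>
          if PySem.Str.startswith (PySem.Str.lower (PySem.Str.strip l0)) (PySem.Str.lower heading)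
          then rest else lines
    pvBLoop lines

-- ===== PRECONDITION & SPEC =====
def Spec_section_blocks_py (section_markdown : String) (heading : String) (out : List (List String)) : Prop := out = section_blocks_py_alt section_markdown heading
instance (section_markdown : String) (heading : String) (out : List (List String)) : Decidable (Spec_section_blocks_py section_markdown heading out) := by unfold Spec_section_blocks_py; infer_instance

-- ===== CLAIM (what is proved, stated in full; the proofs are below) =====
def Claim_equal_section_blocks_py : Prop := ∀ (section_markdown : String) (heading : String), Dom_section_blocks_py section_markdown heading → Spec_section_blocks_py section_markdown heading (section_blocks_py section_markdown heading)

-- ===== LEMMAS AND PROOFS =====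
-- A's fold with state equals B's run scanner: for empty `current` the remaining fold is
-- `blocks ++ pvBLoop lines`; for non-empty `current` the current block is completed by the
-- next maximal non-blank run.
theorem pvBLoop_cons_blank (l : String) (rest : List String) (hl : pvNonBlank l = false) :
    pvBLoop (l :: rest) = pvBLoop rest := by
  rw [pvBLoop, hl]; simp

theorem pvBLoop_cons_nonblank (l : String) (rest : List String) (hl : pvNonBlank l = true) :
    pvBLoop (l :: rest) =
      ((l :: rest).takeWhile pvNonBlank).map PySem.Str.rstrip ::
        pvBLoop ((l :: rest).dropWhile pvNonBlank) := by
  rw [pvBLoop, hl]; simp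

theorem pvLoop_eq (lines : List String) : ∀ (blocks : List (List String)) (current : List String),
    pvALoop lines blocks current =
      if current = [] then blocks ++ pvBLoop lines
      else blocks ++ [current ++ (lines.takeWhile pvNonBlank).map PySem.Str.rstrip]
             ++ pvBLoop (lines.dropWhile pvNonBlank) := by
  induction lines with
  | nil =>
      intro blocks current
      by_cases hc : current = [] <;> simp [pvALoop, pvBLoop, hc]
  | cons l rest ih =>
      intro blocks current
      by_cases hl : PySem.Str.strip l = ""
      · have hnb : pvNonBlank l = false := by simp [pvNonBlank, hl]
        by_cases hc : current = [] <;>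
          simp [pvALoop, hl, hc, pvBLoop_cons_blank l rest hnb, hnb,
            List.takeWhile, List.dropWhile, ih]
      · have hnb : pvNonBlank l = true := by simp [pvNonBlank, hl]
        by_cases hc : current = [] <;>
          simp [pvALoop, hl, hc, pvBLoop_cons_nonblank l rest hnb, hnb,
            List.takeWhile, List.dropWhile, ih]

theorem section_blocks_py_eq_alt (section_markdown : String) (heading : String) :
    section_blocks_py section_markdown heading = section_blocks_py_alt section_markdown heading := by
  unfold section_blocks_py section_blocks_py_alt
  by_cases h : PySem.Str.strip section_markdown = "" <;> simp [h, pvLoop_eq]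

-- ===== VERDICT (by name: the statement is the Claim_ definition above) =====
theorem section_blocks_py_spec : Claim_equal_section_blocks_py := by
  intro s h _
  exact section_blocks_py_eq_alt s h
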